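-- pv_equiv track=rewrite | github.com/cgourdet/Miami-Ai--EnvironmentalImpact | webapp/app.py | ask_chatgpt
-- ===== SOURCE A (Python) =====
-- mocked_chatgpt = {
--     'Scombridae -Tunas-': [
--         'Specific name: Scombridae (Tunas)',
--         'Native habitat: Tropical and temperate oceans',
--         'Population: Abundant, no specific numbers',
--         'Endangerment status: Not endangered',
--         'Hazard to coastal waters: No',
--         'Harmful if removed: Yes, can disrupt food web',
--         'Impact on marine ecosystem: Important top predator',
--         'Conservation efforts: Manage fishing quotas',
--         'Sustainable seafood option: Yes',
--         'Removal: Leave in natural habitat',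
--     ],
--     'Lutjanidae -Snappers-': [
--         'Specific name: Lutjanidae (Snappers)',
--         'Native habitat: Coral reefs and estuaries',
--         'Population: Varies by species',
--         'Endangerment status: Some species threatened or endangered',
--         'Hazard to coastal waters: No',
--         'Harmful if removed: Yes, can disrupt food web',
--         'Impact on marine ecosystem: Important prey species',
--         'Conservation efforts: Manage fishing quotas',
--         'Sustainable seafood option: Yes, for some species',
--         'Removal: Leave in natural habitat unless harmful or illegal fishing.',
--     ],
--     "Carangidae -Jacks-": [
--         'Specific name: Carangidae (Jacks)',
--         'Native habitat: Coastal waters and reefs',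
--         'Population: Abundant, no specific numbers',
--         'Endangerment status: Not endangered',
--         'Hazard to coastal waters: No',
--         'Harmful if removed: Yes, can disrupt food web',
--         'Impact on marine ecosystem: Important prey species',
--         'Conservation efforts: Manage fishing quotas',
--         'Sustainable seafood option: Yes, for some species',
--         'Removal: Leave in natural habitat unless harmful or illegal fishing.',
--     ],
--     "Acanthuridae -Surgeonfishes-": [
--         'Specific name: Acanthuridae (Surgeonfishes)',
--         'Native habitat: Coral reefs and rocky areas',
--         'Population: Varies by species',
--         'Endangerment status: Not endangered',
--         'Hazard to coastal waters: No',
--         'Harmful if removed: Yes, can disrupt food web',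
--         'Impact on marine ecosystem: Important herbivores',
--         'Conservation efforts: Protect reef habitats',
--         'Sustainable seafood option: No',
--         'Removal: Leave in natural habitat unless harmful or illegal fishing.',
--     ],
--     'gray snapper': [
--         'Scientific name: Lutjanus spp',
--         'Native habitat: Coral reefs',
--         'Population: Varies by species',
--         'Endangerment status: Some species are overfished',
--         'Hazard to coastal water if removed: No',
--         'Recommendation: Leave in the wild unless within legal size and bag limit for fishing.',
--     ],
-- }
--
-- def ask_chatgpt(img_with_annos):
--     answers = list()
--     cat_names = set()
--     for anno in img_with_annos['annos']:
--         cat = anno['category']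
--         if cat in cat_names:
--             continue
--         cat_names.add(cat)
--         if cat in mocked_chatgpt:
--             answer = mocked_chatgpt[cat]
--         else:
--             # TODO: Remove this hack
--             answer = mocked_chatgpt['gray snapper']
--         answers.append(answer)
--     return answers
-- ===== SOURCE B (Python) =====
-- mocked_chatgpt = {
--     'Scombridae -Tunas-': [
--         'Specific name: Scombridae (Tunas)',
--         'Native habitat: Tropical and temperate oceans',
--         'Population: Abundant, no specific numbers',
--         'Endangerment status: Not endangered',
--         'Hazard to coastal waters: No',
--         'Harmful if removed: Yes, can disrupt food web',
--         'Impact on marine ecosystem: Important top predator',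
--         'Conservation efforts: Manage fishing quotas',
--         'Sustainable seafood option: Yes',
--         'Removal: Leave in natural habitat',
--     ],
--     'Lutjanidae -Snappers-': [
--         'Specific name: Lutjanidae (Snappers)',
--         'Native habitat: Coral reefs and estuaries',
--         'Population: Varies by species',
--         'Endangerment status: Some species threatened or endangered',
--         'Hazard to coastal waters: No',
--         'Harmful if removed: Yes, can disrupt food web',
--         'Impact on marine ecosystem: Important prey species',
--         'Conservation efforts: Manage fishing quotas',
--         'Sustainable seafood option: Yes, for some species',
--         'Removal: Leave in natural habitat unless harmful or illegal fishing.',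
--     ],
--     "Carangidae -Jacks-": [
--         'Specific name: Carangidae (Jacks)',
--         'Native habitat: Coastal waters and reefs',
--         'Population: Abundant, no specific numbers',
--         'Endangerment status: Not endangered',
--         'Hazard to coastal waters: No',
--         'Harmful if removed: Yes, can disrupt food web',
--         'Impact on marine ecosystem: Important prey species',
--         'Conservation efforts: Manage fishing quotas',
--         'Sustainable seafood option: Yes, for some species',
--         'Removal: Leave in natural habitat unless harmful or illegal fishing.',
--     ],
--     "Acanthuridae -Surgeonfishes-": [
--         'Specific name: Acanthuridae (Surgeonfishes)',
--         'Native habitat: Coral reefs and rocky areas',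
--         'Population: Varies by species',
--         'Endangerment status: Not endangered',
--         'Hazard to coastal waters: No',
--         'Harmful if removed: Yes, can disrupt food web',
--         'Impact on marine ecosystem: Important herbivores',
--         'Conservation efforts: Protect reef habitats',
--         'Sustainable seafood option: No',
--         'Removal: Leave in natural habitat unless harmful or illegal fishing.',
--     ],
--     'gray snapper': [
--         'Scientific name: Lutjanus spp',
--         'Native habitat: Coral reefs',
--         'Population: Varies by species',
--         'Endangerment status: Some species are overfished',
--         'Hazard to coastal water if removed: No',
--         'Recommendation: Leave in the wild unless within legal size and bag limit for fishing.',
--     ],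
-- }
--
-- def ask_chatgpt(img_with_annos):
--     # recursive dedup-by-filtering (nub): answer the first annotation's category,
--     # then recurse on the tail with every annotation of that category removed.
--     def walk(annos):
--         if not annos:
--             return []
--         cat = annos[0]['category']
--         answer = mocked_chatgpt.get(cat, mocked_chatgpt['gray snapper'])
--         return [answer] + walk([a for a in annos[1:] if a['category'] != cat])
--     return walk(img_with_annos['annos'])
-- ===== Notes on version B (the rewrite author's own statement) =====
-- stated objective: alternative
-- what changed: B replaces A's single accumulator loop with a seen-set by a recursive nub: emit the first annotation's category lookup, then recurse on the tail with all annotations of that category filtered out (no seen-set, no accumulator).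
import Mathlib
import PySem

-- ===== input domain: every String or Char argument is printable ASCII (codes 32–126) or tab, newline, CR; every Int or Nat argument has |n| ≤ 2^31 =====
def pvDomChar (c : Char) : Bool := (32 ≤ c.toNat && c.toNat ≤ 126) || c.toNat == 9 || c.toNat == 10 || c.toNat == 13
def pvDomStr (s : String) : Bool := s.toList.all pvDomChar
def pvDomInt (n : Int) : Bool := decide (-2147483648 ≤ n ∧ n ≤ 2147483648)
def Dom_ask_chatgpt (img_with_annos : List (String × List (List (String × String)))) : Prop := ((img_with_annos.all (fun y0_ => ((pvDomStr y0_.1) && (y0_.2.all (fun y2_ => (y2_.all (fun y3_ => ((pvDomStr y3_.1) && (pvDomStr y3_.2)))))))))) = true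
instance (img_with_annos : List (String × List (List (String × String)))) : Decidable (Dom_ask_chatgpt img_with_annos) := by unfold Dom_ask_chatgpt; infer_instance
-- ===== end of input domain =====

-- B replaces A's seen-set accumulator loop by a recursive nub: answer the head category, then
-- recurse on the tail with that category filtered out.  Objective: alternative (not faster).

-- the module-level mocked_chatgpt dict (shared context of A and B)
def mocked_chatgpt : PySem.Dict String (List String) :=
  PySem.Dict.mk
  [ ("Scombridae -Tunas-",
     [ "Specific name: Scombridae (Tunas)",
       "Native habitat: Tropical and temperate oceans",
       "Population: Abundant, no specific numbers",
       "Endangerment status: Not endangered",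
       "Hazard to coastal waters: No",
       "Harmful if removed: Yes, can disrupt food web",
       "Impact on marine ecosystem: Important top predator",
       "Conservation efforts: Manage fishing quotas",
       "Sustainable seafood option: Yes",
       "Removal: Leave in natural habitat" ]),
    ("Lutjanidae -Snappers-",
     [ "Specific name: Lutjanidae (Snappers)",
       "Native habitat: Coral reefs and estuaries",
       "Population: Varies by species",
       "Endangerment status: Some species threatened or endangered",
       "Hazard to coastal waters: No",
       "Harmful if removed: Yes, can disrupt food web",
       "Impact on marine ecosystem: Important prey species",
       "Conservation efforts: Manage fishing quotas",
       "Sustainable seafood option: Yes, for some species",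
       "Removal: Leave in natural habitat unless harmful or illegal fishing." ]),
    ("Carangidae -Jacks-",
     [ "Specific name: Carangidae (Jacks)",
       "Native habitat: Coastal waters and reefs",
       "Population: Abundant, no specific numbers",
       "Endangerment status: Not endangered",
       "Hazard to coastal waters: No",
       "Harmful if removed: Yes, can disrupt food web",
       "Impact on marine ecosystem: Important prey species",
       "Conservation efforts: Manage fishing quotas",
       "Sustainable seafood option: Yes, for some species",
       "Removal: Leave in natural habitat unless harmful or illegal fishing." ]),
    ("Acanthuridae -Surgeonfishes-",
     [ "Specific name: Acanthuridae (Surgeonfishes)",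
       "Native habitat: Coral reefs and rocky areas",
       "Population: Varies by species",
       "Endangerment status: Not endangered",
       "Hazard to coastal waters: No",
       "Harmful if removed: Yes, can disrupt food web",
       "Impact on marine ecosystem: Important herbivores",
       "Conservation efforts: Protect reef habitats",
       "Sustainable seafood option: No",
       "Removal: Leave in natural habitat unless harmful or illegal fishing." ]),
    ("gray snapper",
     [ "Scientific name: Lutjanus spp",
       "Native habitat: Coral reefs",
       "Population: Varies by species",
       "Endangerment status: Some species are overfished",
       "Hazard to coastal water if removed: No",
       "Recommendation: Leave in the wild unless within legal size and bag limit for fishing." ]) ]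

-- ===== PORT A =====
-- A's single loop: skip already-seen categories, record the category, then look it up (hard-coded
-- 'gray snapper' fallback).  anno['category'] ported as getD (Pre_ guarantees the key is present).
def ask_chatgpt (img_with_annos : List (String × List (List (String × String)))) : List (List String) :=
  let annos := PySem.Dict.getD (PySem.Dict.mk img_with_annos) "annos" []
  (annos.foldl
    (fun (st : List (List String) × PySem.Set String) anno =>
      let cat := PySem.Dict.getD (PySem.Dict.mk anno) "category" ""
      if PySem.Set.contains st.2 cat then st
      else
        let cat_names := PySem.Set.add st.2 cat
        let answer := match PySem.Dict.get? mocked_chatgpt cat with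
          | some a => a
          | none => PySem.Dict.getD mocked_chatgpt "gray snapper" []
        (st.1 ++ [answer], cat_names))
    ([], PySem.Set.empty)).1

-- ===== PORT B =====
-- B's inner recursive 'walk': answer the head's category, recurse on the filtered tail.
def ask_chatgpt_walk (annos : List (List (String × String))) : List (List String) :=
  match annos with
  | [] => []
  | a :: rest =>
    let cat := PySem.Dict.getD (PySem.Dict.mk a) "category" ""
    let answer := (PySem.Dict.get? mocked_chatgpt cat).getD (PySem.Dict.getD mocked_chatgpt "gray snapper" [])
    answer :: ask_chatgpt_walk (rest.filter (fun b => PySem.Dict.getD (PySem.Dict.mk b) "category" "" != cat))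
termination_by annos.length
decreasing_by simpa using Nat.lt_succ_of_le (List.length_filter_le _ _)

def ask_chatgpt_alt (img_with_annos : List (String × List (List (String × String)))) : List (List String) :=
  ask_chatgpt_walk (PySem.Dict.getD (PySem.Dict.mk img_with_annos) "annos" [])

-- ===== PRECONDITION & SPEC =====
-- Pre_ excludes exactly the inputs where the Python A raises KeyError: a missing 'annos' key, or
-- an anno without a 'category' key.
def Pre_ask_chatgpt (img_with_annos : List (String × List (List (String × String)))) : Prop :=
  (PySem.Dict.get? (PySem.Dict.mk img_with_annos) "annos").isSome = true ∧
  ((PySem.Dict.getD (PySem.Dict.mk img_with_annos) "annos" []).all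
    (fun anno => (PySem.Dict.get? (PySem.Dict.mk anno) "category").isSome)) = true
instance (img_with_annos : List (String × List (List (String × String)))) : Decidable (Pre_ask_chatgpt img_with_annos) := by unfold Pre_ask_chatgpt; infer_instance

def pvWitness_ask_chatgpt : (List (String × List (List (String × String)))) :=
  [("annos", [[("category", "gray snapper")], [("category", "unknown fish")]])]

def Spec_ask_chatgpt (img_with_annos : List (String × List (List (String × String)))) (out : List (List String)) : Prop := out = ask_chatgpt_alt img_with_annos
instance (img_with_annos : List (String × List (List (String × String)))) (out : List (List String)) : Decidable (Spec_ask_chatgpt img_with_annos out) := by unfold Spec_ask_chatgpt; infer_instance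

-- ===== CLAIM (what is proved, stated in full; the proofs are below) =====
def Claim_equal_ask_chatgpt : Prop := ∀ (img_with_annos : List (String × List (List (String × String)))), Dom_ask_chatgpt img_with_annos → Pre_ask_chatgpt img_with_annos → Spec_ask_chatgpt img_with_annos (ask_chatgpt img_with_annos)

-- ===== LEMMAS AND PROOFS =====

-- the lookup both programs perform, as a function of the category
def pvLook (cat : String) : List String :=
  (PySem.Dict.get? mocked_chatgpt cat).getD (PySem.Dict.getD mocked_chatgpt "gray snapper" [])

-- the category of an annotation, as both ports read it
def pvCat (anno : List (String × String)) : String :=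
  PySem.Dict.getD (PySem.Dict.mk anno) "category" ""

-- PySem.Set.add only ever appends, so a foldl of adds keeps the start set as a prefix
theorem foldl_add_prefix (cs : List String) :
    ∀ (s : List String), ∃ t, cs.foldl PySem.Set.add s = s ++ t := by
  induction cs with
  | nil => exact fun s => ⟨[], by simp⟩
  | cons c cs ih =>
    intro s
    by_cases hc : c ∈ s
    · obtain ⟨t, ht⟩ := ih s
      exact ⟨t, by simp [List.foldl_cons, PySem.Set.add_of_mem hc, ht]⟩
    · obtain ⟨t, ht⟩ := ih (s ++ [c])
      exact ⟨c :: t, by simp [List.foldl_cons, PySem.Set.add_of_not_mem hc, ht]⟩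

-- A's interleaved loop = lookups mapped over the freshly-seen categories
theorem loop_eq (cs : List String) :
    ∀ (acc : List (List String)) (s : List String),
    (cs.foldl
      (fun (st : List (List String) × PySem.Set String) cat =>
        if PySem.Set.contains st.2 cat then st
        else (st.1 ++ [pvLook cat], PySem.Set.add st.2 cat))
      (acc, s)).1
    = acc ++ ((cs.foldl PySem.Set.add s).drop s.length).map pvLook := by
  induction cs with
  | nil => simp
  | cons c cs ih =>
    intro acc s
    by_cases hc : c ∈ s
    · have h1 : PySem.Set.contains s c = true := by simp [hc]
      have h2 : PySem.Set.add s c = s := PySem.Set.add_of_mem hc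
      simp only [List.foldl_cons, h1, if_true, h2, ih]
    · have h1 : PySem.Set.contains s c = false := by simp [hc]
      have h2 : PySem.Set.add s c = s ++ [c] := PySem.Set.add_of_not_mem hc
      obtain ⟨t, ht⟩ := foldl_add_prefix cs (s ++ [c])
      have dl : (s ++ [c] ++ t).drop (s ++ [c]).length = t := by simp
      have dr : (s ++ [c] ++ t).drop s.length = c :: t := by
        rw [List.append_assoc]
        simp
      simp only [List.foldl_cons, h1, Bool.false_eq_true, if_false, h2, ih, ht, dl, dr]
      simp

-- A's whole loop computes map pvLook over the ordered-unique categories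
theorem a_loop_eq_dedup (annos : List (List (String × String))) :
    (annos.foldl
      (fun (st : List (List String) × PySem.Set String) anno =>
        let cat := PySem.Dict.getD (PySem.Dict.mk anno) "category" ""
        if PySem.Set.contains st.2 cat then st
        else
          let cat_names := PySem.Set.add st.2 cat
          let answer := match PySem.Dict.get? mocked_chatgpt cat with
            | some a => a
            | none => PySem.Dict.getD mocked_chatgpt "gray snapper" []
          (st.1 ++ [answer], cat_names))
      ([], PySem.Set.empty)).1
    = (PySem.List.dedup (annos.map pvCat)).map pvLook := by
  have hmatch : ∀ cat : String,
      (match PySem.Dict.get? mocked_chatgpt cat with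
        | some a => a
        | none => PySem.Dict.getD mocked_chatgpt "gray snapper" []) = pvLook cat := by
    intro cat
    unfold pvLook
    cases PySem.Dict.get? mocked_chatgpt cat <;> rfl
  have hfold :
      (annos.foldl
        (fun (st : List (List String) × PySem.Set String) anno =>
          let cat := PySem.Dict.getD (PySem.Dict.mk anno) "category" ""
          if PySem.Set.contains st.2 cat then st
          else
            let cat_names := PySem.Set.add st.2 cat
            let answer := match PySem.Dict.get? mocked_chatgpt cat with
              | some a => a
              | none => PySem.Dict.getD mocked_chatgpt "gray snapper" []
            (st.1 ++ [answer], cat_names))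
        ([], PySem.Set.empty))
      = ((annos.map pvCat).foldl
          (fun (st : List (List String) × PySem.Set String) cat =>
            if PySem.Set.contains st.2 cat then st
            else (st.1 ++ [pvLook cat], PySem.Set.add st.2 cat))
          ([], PySem.Set.empty)) := by
    rw [List.foldl_map]
    congr 1
    funext st anno
    simp only [hmatch, pvCat]
  rw [hfold, loop_eq]
  simp [PySem.List.dedup_eq_ofList, PySem.Set.ofList_eq_foldl]

-- elements of the seen set are never re-added, so filtering one of them out changes nothing
theorem foldl_add_filter_mem (cs : List String) :
    ∀ (s : List String) (c : String), c ∈ s →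
      (cs.filter (fun x => x != c)).foldl PySem.Set.add s = cs.foldl PySem.Set.add s := by
  induction cs with
  | nil => intro s c _; rfl
  | cons x cs ih =>
    intro s c hc
    by_cases hx : x = c
    · subst hx
      simp only [List.filter_cons, bne_self_eq_false, Bool.false_eq_true, if_false,
        List.foldl_cons, PySem.Set.add_of_mem hc]
      exact ih s x hc
    · have hb : (x != c) = true := by simp [hx]
      simp only [List.filter_cons, hb, if_true, List.foldl_cons]
      have hc' : c ∈ PySem.Set.add s x := by
        rw [PySem.Set.add_eq_ite]; split <;> simp [hc]
      exact ih (PySem.Set.add s x) c hc'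

-- adding a fresh front element first just prepends it (when it never recurs in the rest)
theorem foldl_add_cons_front (ds : List String) :
    ∀ (s : List String) (c : String), c ∉ ds →
      ds.foldl PySem.Set.add (c :: s) = c :: ds.foldl PySem.Set.add s := by
  induction ds with
  | nil => intro s c _; rfl
  | cons x ds ih =>
    intro s c hc
    have hxc : x ≠ c := fun h => hc (h ▸ List.mem_cons_self)
    have hrest : c ∉ ds := fun h => hc (List.mem_cons_of_mem _ h)
    have hadd : PySem.Set.add (c :: s) x = c :: PySem.Set.add s x := by
      rw [PySem.Set.add_eq_ite, PySem.Set.add_eq_ite]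
      by_cases hx : x ∈ s
      · simp [hx, hxc]
      · simp [hx, hxc]
    simp only [List.foldl_cons, hadd]
    exact ih (PySem.Set.add s x) c hrest

-- the head-and-filter recursion step of the ordered dedup
theorem dedup_cons (c : String) (cs : List String) :
    PySem.List.dedup (c :: cs) = c :: PySem.List.dedup (cs.filter (fun x => x != c)) := by
  have hnotin : c ∉ cs.filter (fun x => x != c) := by simp
  calc PySem.List.dedup (c :: cs)
      = (c :: cs).foldl PySem.Set.add [] := by
        simp [PySem.List.dedup_eq_ofList, PySem.Set.ofList_eq_foldl]
    _ = cs.foldl PySem.Set.add [c] := by simp [List.foldl_cons]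
    _ = (cs.filter (fun x => x != c)).foldl PySem.Set.add [c] := by
        rw [foldl_add_filter_mem cs [c] c (by simp)]
    _ = c :: (cs.filter (fun x => x != c)).foldl PySem.Set.add [] :=
        foldl_add_cons_front _ [] c hnotin
    _ = c :: PySem.List.dedup (cs.filter (fun x => x != c)) := by
        simp [PySem.List.dedup_eq_ofList, PySem.Set.ofList_eq_foldl]

-- filtering annotations by category commutes with extracting the categories
theorem map_cat_filter (rest : List (List (String × String))) (c : String) :
    (rest.filter (fun b => pvCat b != c)).map pvCat = (rest.map pvCat).filter (fun x => x != c) := by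
  induction rest with
  | nil => rfl
  | cons a rest ih =>
    by_cases h : pvCat a = c
    · simp [h, ih]
    · simp [h, ih]

-- B's recursion computes the same map over the ordered-unique categories
theorem walk_eq_dedup_aux (n : Nat) :
    ∀ (annos : List (List (String × String))), annos.length ≤ n →
      ask_chatgpt_walk annos = (PySem.List.dedup (annos.map pvCat)).map pvLook := by
  induction n with
  | zero =>
    intro annos h
    have : annos = [] := List.eq_nil_of_length_eq_zero (Nat.le_zero.mp h)
    subst this
    simp [ask_chatgpt_walk, PySem.List.dedup_eq_ofList]
  | succ n ih =>
    intro annos h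
    match annos with
    | [] => simp [ask_chatgpt_walk, PySem.List.dedup_eq_ofList]
    | a :: rest =>
      rw [ask_chatgpt_walk]
      have e : (fun b => PySem.Dict.getD (PySem.Dict.mk b) "category" "" != PySem.Dict.getD (PySem.Dict.mk a) "category" "")
          = (fun b => pvCat b != pvCat a) := rfl
      rw [e]
      have hlen : (rest.filter (fun b => pvCat b != pvCat a)).length ≤ n := by
        have := List.length_filter_le (fun b => pvCat b != pvCat a) rest
        simpa using Nat.le_trans this (Nat.le_of_succ_le_succ h)
      rw [ih _ hlen]
      rw [show (a :: rest).map pvCat = pvCat a :: rest.map pvCat from rfl, dedup_cons]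
      rw [map_cat_filter rest (pvCat a)]
      rfl

theorem walk_eq_dedup (annos : List (List (String × String))) :
    ask_chatgpt_walk annos = (PySem.List.dedup (annos.map pvCat)).map pvLook :=
  walk_eq_dedup_aux annos.length annos (Nat.le_refl _)

-- ===== VERDICT (by name: the statement is the Claim_ definition above) =====
theorem ask_chatgpt_spec : Claim_equal_ask_chatgpt := by
  intro img _ _
  show ask_chatgpt img = ask_chatgpt_alt img
  unfold ask_chatgpt ask_chatgpt_alt
  rw [walk_eq_dedup]
  exact a_loop_eq_dedup _
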